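-- pv_equiv track=rewrite | github.com/Manolo-dev/Aruba | atelier_2.py | est_au_bon_format
-- ===== SOURCE A (Python) =====
-- def est_au_bon_format(coord:str) -> bool:
--     """
--         Vérifie si une chaîne de caractères est au bon format
--
--         Parameters:
--         -----------
--         coord: str
--             La chaîne de caractères à vérifier
--
--         Returns:
--         --------
--         bool
--             True si la chaîne de caractères est au bon format, False sinon
--     """
--
--     if not coord:  # Vérifie que la chaîne n'est pas vide
--         return False
--
--     i = 0
--     while i < len(coord) and coord[i].isalpha(): # Récupère la partie lettre
--         i += 1
--
--     if i == 0 or i == len(coord): # Il faut au moins une lettre et un chiffre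
--         return False
--
--     return coord[i:].isdigit() # Vérifie que le reste est un nombre
-- ===== SOURCE B (Python) =====
-- def est_au_bon_format(coord: str) -> bool:
--     seen_letter = False
--     seen_digit = False
--     for c in coord:
--         if c.isalpha():
--             if seen_digit:
--                 return False
--             seen_letter = True
--         elif c.isdigit():
--             seen_digit = True
--         else:
--             return False
--     return seen_letter and seen_digit
-- ===== Notes on version B (the rewrite author's own statement) =====
-- stated objective: simpler
-- what changed: Replaced the index-based while loop plus slice and str.isdigit suffix check by a single forward pass carrying two booleans (seen_letter, seen_digit) with early returns.
import Mathlib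
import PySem

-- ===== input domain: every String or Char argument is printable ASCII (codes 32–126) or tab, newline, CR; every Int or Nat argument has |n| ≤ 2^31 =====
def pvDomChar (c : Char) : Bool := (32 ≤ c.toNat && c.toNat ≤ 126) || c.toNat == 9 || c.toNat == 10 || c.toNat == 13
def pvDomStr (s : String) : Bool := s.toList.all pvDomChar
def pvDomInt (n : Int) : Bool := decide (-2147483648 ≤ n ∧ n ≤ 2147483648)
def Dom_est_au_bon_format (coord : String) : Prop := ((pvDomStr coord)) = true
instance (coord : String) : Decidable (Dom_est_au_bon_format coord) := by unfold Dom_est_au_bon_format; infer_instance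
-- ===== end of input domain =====

-- B replaces A's index-based while loop + slice + isdigit check by a single-pass
-- two-flag state machine over the characters (objective: simpler; no speed claim).

-- ===== PORT A =====
-- the while loop 'while i < len(coord) and coord[i].isalpha(): i += 1' as structural recursion
def pvAlphaLen : List Char → Nat
  | [] => 0
  | c :: cs => if PySem.Chars.isalpha c then pvAlphaLen cs + 1 else 0

def est_au_bon_format (coord : String) : Bool :=
  let cs := coord.toList
  if cs = [] then false
  else
    let i := pvAlphaLen cs
    if i = 0 ∨ i = cs.length then false
    else PySem.Chars.strIsdigit (PySem.List.slice cs (some (Int.ofNat i)) none)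

-- ===== PORT B =====
-- the for-loop of Source B, carrying the two flags (seen_letter, seen_digit); early returns = base cases
def pvAltGo : List Char → Bool → Bool → Bool
  | [], sl, sd => sl && sd
  | c :: cs, sl, sd =>
    if PySem.Chars.isalpha c then
      if sd then false else pvAltGo cs true sd
    else if PySem.Chars.isdigit c then pvAltGo cs sl true
    else false

def est_au_bon_format_alt (coord : String) : Bool :=
  pvAltGo coord.toList false false

-- ===== PRECONDITION & SPEC =====
def Spec_est_au_bon_format (coord : String) (out : Bool) : Prop := out = est_au_bon_format_alt coord
instance (coord : String) (out : Bool) : Decidable (Spec_est_au_bon_format coord out) := by unfold Spec_est_au_bon_format; infer_instance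

-- ===== CLAIM (what is proved, stated in full; the proofs are below) =====
def Claim_equal_est_au_bon_format : Prop := ∀ (coord : String), Dom_est_au_bon_format coord → Spec_est_au_bon_format coord (est_au_bon_format coord)

-- ===== LEMMAS AND PROOFS =====

theorem alpha_not_digit (c : Char) (h : PySem.Chars.isalpha c = true) :
    PySem.Chars.isdigit c = false := by
  simp [PySem.Chars.isalpha, PySem.Chars.isdigit, PySem.Chars.isupper, PySem.Chars.islower,
        Char.le_def, UInt32.le_iff_toNat_le] at *
  omega

theorem altGo_false_true (cs : List Char) : pvAltGo cs false true = false := by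
  induction cs with
  | nil => rfl
  | cons c cs ih => simp [pvAltGo, ih]

theorem altGo_true_true (cs : List Char) :
    pvAltGo cs true true = cs.all PySem.Chars.isdigit := by
  induction cs with
  | nil => rfl
  | cons c cs ih =>
    by_cases ha : PySem.Chars.isalpha c = true
    · simp [pvAltGo, ha, alpha_not_digit c ha]
    · by_cases hd : PySem.Chars.isdigit c = true
      · simp [pvAltGo, ha, hd, ih]
      · simp [pvAltGo, ha, hd]

theorem altGo_true_false (cs : List Char) :
    pvAltGo cs true false =
      (!(cs.drop (pvAlphaLen cs)).isEmpty && (cs.drop (pvAlphaLen cs)).all PySem.Chars.isdigit) := by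
  induction cs with
  | nil => rfl
  | cons c cs ih =>
    by_cases ha : PySem.Chars.isalpha c = true
    · simp [pvAltGo, pvAlphaLen, ha, ih]
    · by_cases hd : PySem.Chars.isdigit c = true
      · simp [pvAltGo, pvAlphaLen, ha, hd, altGo_true_true, List.isEmpty]
      · simp [pvAltGo, pvAlphaLen, ha, hd, List.isEmpty]

theorem alphaLen_le (cs : List Char) : pvAlphaLen cs ≤ cs.length := by
  induction cs with
  | nil => simp [pvAlphaLen]
  | cons c cs ih => simp [pvAlphaLen]; split_ifs <;> omega

theorem strIsdigit_eq_all (cs : List Char) :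
    PySem.Chars.strIsdigit cs = (!cs.isEmpty && cs.all PySem.Chars.isdigit) := by
  simp [PySem.Chars.strIsdigit]

theorem slice_from_nat (cs : List Char) (i : Nat) :
    PySem.List.slice cs (some (Int.ofNat i)) none = cs.drop i := by
  simpa using PySem.List.slice_from cs i

-- ===== VERDICT (by name: the statement is the Claim_ definition above) =====
theorem est_au_bon_format_spec : Claim_equal_est_au_bon_format := by
  intro coord _
  unfold Spec_est_au_bon_format est_au_bon_format est_au_bon_format_alt
  cases h : coord.toList with
  | nil => simp [pvAltGo]
  | cons c cs =>
    simp only [List.cons_ne_nil, if_false, reduceIte]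
    by_cases ha : PySem.Chars.isalpha c = true
    · -- first char is a letter: i ≥ 1, A = digit-check of the suffix, B = pvAltGo cs true false
      simp only [pvAlphaLen, ha, if_pos, pvAltGo]
      rw [altGo_true_false, slice_from_nat, strIsdigit_eq_all]
      have hle := alphaLen_le cs
      by_cases he : pvAlphaLen cs = cs.length
      · simp [he, List.drop_length, List.length_cons]
      · have : ¬(pvAlphaLen cs + 1 = 0 ∨ pvAlphaLen cs + 1 = (c :: cs).length) := by
          simp [List.length_cons]; omega
        simp only [this, if_false, List.drop_succ_cons, reduceIte]
        have : (cs.drop (pvAlphaLen cs)) ≠ [] := by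
          intro hnil
          have := List.drop_eq_nil_iff.mp hnil
          omega
        simp [List.isEmpty_iff, this]
    · -- first char not a letter: A returns false (i = 0)
      simp only [pvAlphaLen, ha, if_neg, pvAltGo, reduceIte]
      by_cases hd : PySem.Chars.isdigit c = true
      · simp [hd, altGo_false_true]
      · simp [hd]
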